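-- pv_equiv track=rewrite | github.com/dietmarja/ECM | generators/generate_curricula_v1.py | generate_module_outcomes
-- ===== SOURCE A (Python) =====
-- def generate_module_outcomes(curriculum_data):
--     """Generate individual module learning outcomes with highly distinctive competence verbs"""
--     module_outcomes = []
--
--     for i, module_name in enumerate(curriculum_data['modules']):
--         # Generate EQF-appropriate outcomes with highly distinctive competence verbs per module
--         if 'Leadership' in module_name or 'Strategic' in module_name:
--             knowledge = f"Evaluate leadership theories, change management principles, and organizational dynamics relevant to {module_name.lower()}"
--             skills = f"Apply leadership techniques, stakeholder engagement methods, and change management approaches in {module_name.lower()} contexts"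
--             competences = f"Champion strategic transformation initiatives, orchestrate organizational change processes, and guide executive stakeholder alignment in {module_name.lower()} practice"
--         elif 'Data' in module_name or 'Analytics' in module_name:
--             knowledge = f"Analyze data analysis methodologies, statistical techniques, and data management principles for {module_name.lower()}"
--             skills = f"Apply analytical tools, visualization software, and reporting platforms for {module_name.lower()} implementation"
--             competences = f"Govern analytical workflows, ensure data integrity protocols, and direct evidence-based decision-making in {module_name.lower()} contexts"
--         elif 'Technology' in module_name or 'Digital' in module_name or 'Tools' in module_name:
--             knowledge = f"Understand digital technologies, system integration principles, and technical standards relevant to {module_name.lower()}"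
--             skills = f"Apply digital tools, implementation methodologies, and technical solutions for {module_name.lower()} delivery"
--             competences = f"Orchestrate technology integration workflows, champion digital innovation processes, and drive technical excellence in {module_name.lower()} contexts"
--         elif 'Monitoring' in module_name or 'Reporting' in module_name or 'Performance' in module_name:
--             knowledge = f"Understand monitoring frameworks, reporting standards, and performance measurement principles for {module_name.lower()}"
--             skills = f"Apply monitoring tools, reporting methodologies, and performance analysis techniques for {module_name.lower()} implementation"
--             competences = f"Govern stakeholder-facing performance reporting, orchestrate measurement workflows, and ensure accountability standards in {module_name.lower()} contexts"
--         elif 'Management' in module_name or 'Coordination' in module_name: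
--             knowledge = f"Understand management principles, coordination frameworks, and organizational systems relevant to {module_name.lower()}"
--             skills = f"Apply management techniques, coordination methods, and organizational tools for {module_name.lower()} delivery"
--             competences = f"Oversee cross-functional programme coordination, facilitate multi-stakeholder operations, and ensure operational excellence in {module_name.lower()} contexts"
--         elif 'Advisory' in module_name or 'Consultant' in module_name or 'Client' in module_name:
--             knowledge = f"Understand advisory methodologies, client engagement principles, and consultation frameworks for {module_name.lower()}"
--             skills = f"Apply consultation techniques, client analysis methods, and advisory tools for {module_name.lower()} delivery"
--             competences = f"Steward advisory relationships, cultivate client partnerships, and nurture stakeholder trust in {module_name.lower()} contexts"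
--         elif 'Design' in module_name or 'Architecture' in module_name or 'Solution' in module_name:
--             knowledge = f"Understand design principles, architectural frameworks, and solution methodologies for {module_name.lower()}"
--             skills = f"Apply design techniques, architectural methods, and solution development tools for {module_name.lower()} implementation"
--             competences = f"Pioneer design innovation workflows, architect sustainable solutions, and drive creative excellence in {module_name.lower()} contexts"
--         elif 'Training' in module_name or 'Education' in module_name or 'Development' in module_name:
--             knowledge = f"Understand educational principles, training methodologies, and development frameworks for {module_name.lower()}"
--             skills = f"Apply training techniques, educational tools, and development methods for {module_name.lower()} delivery"
--             competences = f"Facilitate capability development activities, nurture learning environments, and guide professional progression in {module_name.lower()} contexts"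
--         elif 'Change' in module_name:
--             knowledge = f"Understand change management theories, organizational transformation principles, and change implementation frameworks for {module_name.lower()}"
--             skills = f"Apply change management techniques, transformation methodologies, and implementation tools for {module_name.lower()} delivery"
--             competences = f"Navigate organizational transformation activities, shepherd change processes, and guide stakeholder adoption in {module_name.lower()} contexts"
--         else:
--             knowledge = f"Understand core principles, theoretical frameworks, and methodological approaches relevant to {module_name.lower()}"
--             skills = f"Apply practical techniques, professional tools, and implementation methodologies for {module_name.lower()} delivery"
--             competences = f"Coordinate professional activities, ensure quality standards, and manage stakeholder relationships in {module_name.lower()} contexts"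
--
--         module_outcomes.append({
--             'module_name': module_name,
--             'knowledge_outcome': knowledge,
--             'skills_outcome': skills,
--             'competences_outcome': competences
--         })
--
--     return module_outcomes
-- ===== SOURCE B (Python) =====
-- # Different strategy: instead of a first-match branch cascade, map every keyword to a
-- # category number, collect ALL keywords occurring in the name and aggregate with min()
-- # (branch order in A == category order, so the minimum matching category is exactly the
-- # branch A takes); the three outcome strings come from format templates indexed by category.
-- KEYWORD_CATEGORY = {
--     'Leadership': 0, 'Strategic': 0,
--     'Data': 1, 'Analytics': 1,
--     'Technology': 2, 'Digital': 2, 'Tools': 2,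
--     'Monitoring': 3, 'Reporting': 3, 'Performance': 3,
--     'Management': 4, 'Coordination': 4,
--     'Advisory': 5, 'Consultant': 5, 'Client': 5,
--     'Design': 6, 'Architecture': 6, 'Solution': 6,
--     'Training': 7, 'Education': 7, 'Development': 7,
--     'Change': 8,
-- }
--
-- TEMPLATES = [
--     ("Evaluate leadership theories, change management principles, and organizational dynamics relevant to {m}",
--      "Apply leadership techniques, stakeholder engagement methods, and change management approaches in {m} contexts",
--      "Champion strategic transformation initiatives, orchestrate organizational change processes, and guide executive stakeholder alignment in {m} practice"),
--     ("Analyze data analysis methodologies, statistical techniques, and data management principles for {m}",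
--      "Apply analytical tools, visualization software, and reporting platforms for {m} implementation",
--      "Govern analytical workflows, ensure data integrity protocols, and direct evidence-based decision-making in {m} contexts"),
--     ("Understand digital technologies, system integration principles, and technical standards relevant to {m}",
--      "Apply digital tools, implementation methodologies, and technical solutions for {m} delivery",
--      "Orchestrate technology integration workflows, champion digital innovation processes, and drive technical excellence in {m} contexts"),
--     ("Understand monitoring frameworks, reporting standards, and performance measurement principles for {m}",
--      "Apply monitoring tools, reporting methodologies, and performance analysis techniques for {m} implementation",
--      "Govern stakeholder-facing performance reporting, orchestrate measurement workflows, and ensure accountability standards in {m} contexts"),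
--     ("Understand management principles, coordination frameworks, and organizational systems relevant to {m}",
--      "Apply management techniques, coordination methods, and organizational tools for {m} delivery",
--      "Oversee cross-functional programme coordination, facilitate multi-stakeholder operations, and ensure operational excellence in {m} contexts"),
--     ("Understand advisory methodologies, client engagement principles, and consultation frameworks for {m}",
--      "Apply consultation techniques, client analysis methods, and advisory tools for {m} delivery",
--      "Steward advisory relationships, cultivate client partnerships, and nurture stakeholder trust in {m} contexts"),
--     ("Understand design principles, architectural frameworks, and solution methodologies for {m}",
--      "Apply design techniques, architectural methods, and solution development tools for {m} implementation",
--      "Pioneer design innovation workflows, architect sustainable solutions, and drive creative excellence in {m} contexts"),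
--     ("Understand educational principles, training methodologies, and development frameworks for {m}",
--      "Apply training techniques, educational tools, and development methods for {m} delivery",
--      "Facilitate capability development activities, nurture learning environments, and guide professional progression in {m} contexts"),
--     ("Understand change management theories, organizational transformation principles, and change implementation frameworks for {m}",
--      "Apply change management techniques, transformation methodologies, and implementation tools for {m} delivery",
--      "Navigate organizational transformation activities, shepherd change processes, and guide stakeholder adoption in {m} contexts"),
--     ("Understand core principles, theoretical frameworks, and methodological approaches relevant to {m}",
--      "Apply practical techniques, professional tools, and implementation methodologies for {m} delivery",
--      "Coordinate professional activities, ensure quality standards, and manage stakeholder relationships in {m} contexts"),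
-- ]
--
--
-- def generate_module_outcomes(curriculum_data):
--     rows = []
--     for name in curriculum_data['modules']:
--         cat = min((c for w, c in KEYWORD_CATEGORY.items() if w in name), default=9)
--         k, s, c = (t.format(m=name.lower()) for t in TEMPLATES[cat])
--         rows.append({
--             'module_name': name,
--             'knowledge_outcome': k,
--             'skills_outcome': s,
--             'competences_outcome': c,
--         })
--     return rows
-- ===== Notes on version B (the rewrite author's own statement) =====
-- stated objective: alternative
-- what changed: A classifies each module by a ten-branch first-match if-elif cascade that stops at the first hit; B instead maps each of the 22 keywords to a category number, scans ALL keywords collecting every match, aggregates them with min() (valid because A's branch order equals the category order), and renders the three outcomes from format templates indexed by that category.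
import Mathlib
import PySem

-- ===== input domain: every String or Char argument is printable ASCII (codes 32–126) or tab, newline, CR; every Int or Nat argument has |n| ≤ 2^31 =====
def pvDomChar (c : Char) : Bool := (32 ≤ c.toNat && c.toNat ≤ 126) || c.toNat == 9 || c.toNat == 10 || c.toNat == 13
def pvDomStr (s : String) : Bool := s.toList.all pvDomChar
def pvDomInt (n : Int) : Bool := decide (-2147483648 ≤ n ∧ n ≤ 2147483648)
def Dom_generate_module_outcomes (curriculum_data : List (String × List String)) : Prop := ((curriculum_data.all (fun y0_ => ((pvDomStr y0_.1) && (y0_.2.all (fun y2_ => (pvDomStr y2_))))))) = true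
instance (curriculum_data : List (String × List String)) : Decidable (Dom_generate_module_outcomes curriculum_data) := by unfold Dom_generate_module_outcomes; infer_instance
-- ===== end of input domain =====

-- B replaces A's first-match if-elif cascade by a keyword→category map whose matches are
-- aggregated with min(), plus category-indexed templates (objective: alternative).

-- ===== PORT A =====
-- Loop body of A: the if-elif chain over the module name ('x' in s → PySem.Str.isIn;
-- the appended dict literal has four distinct literal keys, so it is exactly this 4-pair assoc list).
def pvOutcomeA (module_name : String) : List (String × String) :=
  let m := PySem.Str.lower module_name
  let (knowledge, skills, competences) :=
    if PySem.Str.isIn "Leadership" module_name || PySem.Str.isIn "Strategic" module_name then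
      ("Evaluate leadership theories, change management principles, and organizational dynamics relevant to " ++ m,
       "Apply leadership techniques, stakeholder engagement methods, and change management approaches in " ++ m ++ " contexts",
       "Champion strategic transformation initiatives, orchestrate organizational change processes, and guide executive stakeholder alignment in " ++ m ++ " practice")
    else if PySem.Str.isIn "Data" module_name || PySem.Str.isIn "Analytics" module_name then
      ("Analyze data analysis methodologies, statistical techniques, and data management principles for " ++ m,
       "Apply analytical tools, visualization software, and reporting platforms for " ++ m ++ " implementation",
       "Govern analytical workflows, ensure data integrity protocols, and direct evidence-based decision-making in " ++ m ++ " contexts")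
    else if PySem.Str.isIn "Technology" module_name || PySem.Str.isIn "Digital" module_name || PySem.Str.isIn "Tools" module_name then
      ("Understand digital technologies, system integration principles, and technical standards relevant to " ++ m,
       "Apply digital tools, implementation methodologies, and technical solutions for " ++ m ++ " delivery",
       "Orchestrate technology integration workflows, champion digital innovation processes, and drive technical excellence in " ++ m ++ " contexts")
    else if PySem.Str.isIn "Monitoring" module_name || PySem.Str.isIn "Reporting" module_name || PySem.Str.isIn "Performance" module_name then
      ("Understand monitoring frameworks, reporting standards, and performance measurement principles for " ++ m,
       "Apply monitoring tools, reporting methodologies, and performance analysis techniques for " ++ m ++ " implementation",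
       "Govern stakeholder-facing performance reporting, orchestrate measurement workflows, and ensure accountability standards in " ++ m ++ " contexts")
    else if PySem.Str.isIn "Management" module_name || PySem.Str.isIn "Coordination" module_name then
      ("Understand management principles, coordination frameworks, and organizational systems relevant to " ++ m,
       "Apply management techniques, coordination methods, and organizational tools for " ++ m ++ " delivery",
       "Oversee cross-functional programme coordination, facilitate multi-stakeholder operations, and ensure operational excellence in " ++ m ++ " contexts")
    else if PySem.Str.isIn "Advisory" module_name || PySem.Str.isIn "Consultant" module_name || PySem.Str.isIn "Client" module_name then
      ("Understand advisory methodologies, client engagement principles, and consultation frameworks for " ++ m,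
       "Apply consultation techniques, client analysis methods, and advisory tools for " ++ m ++ " delivery",
       "Steward advisory relationships, cultivate client partnerships, and nurture stakeholder trust in " ++ m ++ " contexts")
    else if PySem.Str.isIn "Design" module_name || PySem.Str.isIn "Architecture" module_name || PySem.Str.isIn "Solution" module_name then
      ("Understand design principles, architectural frameworks, and solution methodologies for " ++ m,
       "Apply design techniques, architectural methods, and solution development tools for " ++ m ++ " implementation",
       "Pioneer design innovation workflows, architect sustainable solutions, and drive creative excellence in " ++ m ++ " contexts")
    else if PySem.Str.isIn "Training" module_name || PySem.Str.isIn "Education" module_name || PySem.Str.isIn "Development" module_name then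
      ("Understand educational principles, training methodologies, and development frameworks for " ++ m,
       "Apply training techniques, educational tools, and development methods for " ++ m ++ " delivery",
       "Facilitate capability development activities, nurture learning environments, and guide professional progression in " ++ m ++ " contexts")
    else if PySem.Str.isIn "Change" module_name then
      ("Understand change management theories, organizational transformation principles, and change implementation frameworks for " ++ m,
       "Apply change management techniques, transformation methodologies, and implementation tools for " ++ m ++ " delivery",
       "Navigate organizational transformation activities, shepherd change processes, and guide stakeholder adoption in " ++ m ++ " contexts")
    else
      ("Understand core principles, theoretical frameworks, and methodological approaches relevant to " ++ m,
       "Apply practical techniques, professional tools, and implementation methodologies for " ++ m ++ " delivery",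
       "Coordinate professional activities, ensure quality standards, and manage stakeholder relationships in " ++ m ++ " contexts")
  [("module_name", module_name), ("knowledge_outcome", knowledge),
   ("skills_outcome", skills), ("competences_outcome", competences)]

-- curriculum_data['modules'] = first-match lookup; a missing key is a KeyError (excluded by Pre_; [] is a placeholder there).
def generate_module_outcomes (curriculum_data : List (String × List String)) : List (List (String × String)) :=
  match (PySem.Dict.mk curriculum_data).get? "modules" with
  | none => []
  | some mods => mods.map pvOutcomeA

-- ===== PORT B =====
-- Source B's KEYWORD_CATEGORY dict: 22 keyword → category-number pairs, in insertion order.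
def pvKeywordCategory : List (String × Nat) :=
  [("Leadership", 0), ("Strategic", 0),
   ("Data", 1), ("Analytics", 1),
   ("Technology", 2), ("Digital", 2), ("Tools", 2),
   ("Monitoring", 3), ("Reporting", 3), ("Performance", 3),
   ("Management", 4), ("Coordination", 4),
   ("Advisory", 5), ("Consultant", 5), ("Client", 5),
   ("Design", 6), ("Architecture", 6), ("Solution", 6),
   ("Training", 7), ("Education", 7), ("Development", 7),
   ("Change", 8)]

-- Source B's TEMPLATES: each "….format(m=…)" template with one {m} is ported as its
-- (prefix, suffix) split, applied as prefix ++ m ++ suffix (exact for these literals).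
def pvTemplates : List ((String × String) × (String × String) × (String × String)) :=
  [(("Evaluate leadership theories, change management principles, and organizational dynamics relevant to ", ""),
    ("Apply leadership techniques, stakeholder engagement methods, and change management approaches in ", " contexts"),
    ("Champion strategic transformation initiatives, orchestrate organizational change processes, and guide executive stakeholder alignment in ", " practice")),
   (("Analyze data analysis methodologies, statistical techniques, and data management principles for ", ""),
    ("Apply analytical tools, visualization software, and reporting platforms for ", " implementation"),
    ("Govern analytical workflows, ensure data integrity protocols, and direct evidence-based decision-making in ", " contexts")),
   (("Understand digital technologies, system integration principles, and technical standards relevant to ", ""),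
    ("Apply digital tools, implementation methodologies, and technical solutions for ", " delivery"),
    ("Orchestrate technology integration workflows, champion digital innovation processes, and drive technical excellence in ", " contexts")),
   (("Understand monitoring frameworks, reporting standards, and performance measurement principles for ", ""),
    ("Apply monitoring tools, reporting methodologies, and performance analysis techniques for ", " implementation"),
    ("Govern stakeholder-facing performance reporting, orchestrate measurement workflows, and ensure accountability standards in ", " contexts")),
   (("Understand management principles, coordination frameworks, and organizational systems relevant to ", ""),
    ("Apply management techniques, coordination methods, and organizational tools for ", " delivery"),
    ("Oversee cross-functional programme coordination, facilitate multi-stakeholder operations, and ensure operational excellence in ", " contexts")),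
   (("Understand advisory methodologies, client engagement principles, and consultation frameworks for ", ""),
    ("Apply consultation techniques, client analysis methods, and advisory tools for ", " delivery"),
    ("Steward advisory relationships, cultivate client partnerships, and nurture stakeholder trust in ", " contexts")),
   (("Understand design principles, architectural frameworks, and solution methodologies for ", ""),
    ("Apply design techniques, architectural methods, and solution development tools for ", " implementation"),
    ("Pioneer design innovation workflows, architect sustainable solutions, and drive creative excellence in ", " contexts")),
   (("Understand educational principles, training methodologies, and development frameworks for ", ""),
    ("Apply training techniques, educational tools, and development methods for ", " delivery"),
    ("Facilitate capability development activities, nurture learning environments, and guide professional progression in ", " contexts")),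
   (("Understand change management theories, organizational transformation principles, and change implementation frameworks for ", ""),
    ("Apply change management techniques, transformation methodologies, and implementation tools for ", " delivery"),
    ("Navigate organizational transformation activities, shepherd change processes, and guide stakeholder adoption in ", " contexts")),
   (("Understand core principles, theoretical frameworks, and methodological approaches relevant to ", ""),
    ("Apply practical techniques, professional tools, and implementation methodologies for ", " delivery"),
    ("Coordinate professional activities, ensure quality standards, and manage stakeholder relationships in ", " contexts"))]

-- Source B's `min((c for w, c in KEYWORD_CATEGORY.items() if w in name), default=9)`:
-- the matching categories collected by one scan over ALL 22 keywords, aggregated by min.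
def pvCategory (module_name : String) : Nat :=
  PySem.List.minD
    (pvKeywordCategory.filterMap
      (fun p => if PySem.Str.isIn p.1 module_name then some p.2 else none))
    (fun c => c) 9

-- `TEMPLATES[cat]`: cat is always 0..9 so the index never raises; getD's default is unreachable.
def pvOutcomeB (module_name : String) : List (String × String) :=
  let m := PySem.Str.lower module_name
  let t := pvTemplates.getD (pvCategory module_name) (("", ""), ("", ""), ("", ""))
  [("module_name", module_name),
   ("knowledge_outcome", t.1.1 ++ m ++ t.1.2),
   ("skills_outcome", t.2.1.1 ++ m ++ t.2.1.2),
   ("competences_outcome", t.2.2.1 ++ m ++ t.2.2.2)]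

def generate_module_outcomes_alt (curriculum_data : List (String × List String)) : List (List (String × String)) :=
  match (PySem.Dict.mk curriculum_data).get? "modules" with
  | none => []
  | some mods => mods.map pvOutcomeB

-- ===== PRECONDITION & SPEC =====
-- A raises KeyError when there is no 'modules' key; exactly those inputs are excluded.
def Pre_generate_module_outcomes (curriculum_data : List (String × List String)) : Prop :=
  "modules" ∈ curriculum_data.map Prod.fst
instance (curriculum_data : List (String × List String)) : Decidable (Pre_generate_module_outcomes curriculum_data) := by unfold Pre_generate_module_outcomes; infer_instance
def pvWitness_generate_module_outcomes : (List (String × List String)) :=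
  [("modules", ["Data Management", "Intro"])]
def Spec_generate_module_outcomes (curriculum_data : List (String × List String)) (out : List (List (String × String))) : Prop := out = generate_module_outcomes_alt curriculum_data
instance (curriculum_data : List (String × List String)) (out : List (List (String × String))) : Decidable (Spec_generate_module_outcomes curriculum_data out) := by unfold Spec_generate_module_outcomes; infer_instance

-- ===== CLAIM (what is proved, stated in full; the proofs are below) =====
def Claim_equal_generate_module_outcomes : Prop := ∀ (curriculum_data : List (String × List String)), Dom_generate_module_outcomes curriculum_data → Pre_generate_module_outcomes curriculum_data → Spec_generate_module_outcomes curriculum_data (generate_module_outcomes curriculum_data)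

-- ===== LEMMAS AND PROOFS =====

-- A-shaped first-match index over a keyword→category list (proof-only helper).
def pvFirstCat (module_name : String) : List (String × Nat) → Nat
  | [] => 9
  | p :: r => if PySem.Str.isIn p.1 module_name then p.2 else pvFirstCat module_name r

-- On a list whose categories are nondecreasing and ≤ 9, min-aggregation = first match.
theorem pv_minD_eq_first (name : String) :
    ∀ (l : List (String × Nat)),
      l.Pairwise (fun a b => a.2 ≤ b.2) → (∀ p ∈ l, p.2 ≤ 9) →
      PySem.List.minD
        (l.filterMap (fun p => if PySem.Str.isIn p.1 name then some p.2 else none))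
        (fun c => c) 9 = pvFirstCat name l := by
  intro l
  induction l with
  | nil => intro _ _; rfl
  | cons p r ih =>
    intro hpw hle
    rcases List.pairwise_cons.mp hpw with ⟨hhd, hr⟩
    by_cases h : PySem.Str.isIn p.1 name = true
    · -- p matches: the collected list is p.2 :: rest with every rest element ≥ p.2
      have hlist : (p :: r).filterMap (fun q => if PySem.Str.isIn q.1 name then some q.2 else none)
          = p.2 :: r.filterMap (fun q => if PySem.Str.isIn q.1 name then some q.2 else none) := by
        simp only [List.filterMap_cons]
        rw [if_pos h]
      have hrest : ∀ x ∈ r.filterMap (fun q => if PySem.Str.isIn q.1 name then some q.2 else none),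
          p.2 ≤ x := by
        intro x hx
        rcases List.mem_filterMap.mp hx with ⟨q, hq, hqx⟩
        by_cases hq' : PySem.Str.isIn q.1 name = true
        · rw [if_pos hq'] at hqx
          cases hqx
          exact hhd q hq
        · rw [if_neg hq'] at hqx
          exact absurd hqx (by simp)
      rw [hlist]
      unfold PySem.List.minD
      rw [PySem.List.min?_id_cons, Option.getD_some]
      have hfold := PySem.List.foldl_min_le
        (r.filterMap (fun q => if PySem.Str.isIn q.1 name then some q.2 else none)) p.2
      have hmem := PySem.List.foldl_min_mem
        (r.filterMap (fun q => if PySem.Str.isIn q.1 name then some q.2 else none)) p.2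
      have hval : (r.filterMap (fun q => if PySem.Str.isIn q.1 name then some q.2 else none)).foldl
          min p.2 = p.2 := by
        rcases hmem with h' | h'
        · exact h'
        · exact Nat.le_antisymm hfold.1 (hrest _ h')
      rw [hval]
      simp only [pvFirstCat]
      rw [if_pos h]
    · -- p does not match: both sides skip p
      have hlist : (p :: r).filterMap (fun q => if PySem.Str.isIn q.1 name then some q.2 else none)
          = r.filterMap (fun q => if PySem.Str.isIn q.1 name then some q.2 else none) := by
        simp only [List.filterMap_cons]
        rw [if_neg h]
      rw [hlist, ih hr (fun q hq => hle q (List.mem_cons_of_mem _ hq))]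
      simp only [pvFirstCat]
      rw [if_neg h]

theorem pvCategory_eq_first (name : String) :
    pvCategory name = pvFirstCat name pvKeywordCategory := by
  unfold pvCategory
  exact pv_minD_eq_first name pvKeywordCategory (by unfold pvKeywordCategory; decide)
    (by unfold pvKeywordCategory; decide)

-- A's or-condition chain as an index (proof-only helper; mirrors A's branch order).
def pvChainCat (n : String) : Nat :=
  if PySem.Str.isIn "Leadership" n || PySem.Str.isIn "Strategic" n then 0
  else if PySem.Str.isIn "Data" n || PySem.Str.isIn "Analytics" n then 1
  else if PySem.Str.isIn "Technology" n || PySem.Str.isIn "Digital" n || PySem.Str.isIn "Tools" n then 2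
  else if PySem.Str.isIn "Monitoring" n || PySem.Str.isIn "Reporting" n || PySem.Str.isIn "Performance" n then 3
  else if PySem.Str.isIn "Management" n || PySem.Str.isIn "Coordination" n then 4
  else if PySem.Str.isIn "Advisory" n || PySem.Str.isIn "Consultant" n || PySem.Str.isIn "Client" n then 5
  else if PySem.Str.isIn "Design" n || PySem.Str.isIn "Architecture" n || PySem.Str.isIn "Solution" n then 6
  else if PySem.Str.isIn "Training" n || PySem.Str.isIn "Education" n || PySem.Str.isIn "Development" n then 7
  else if PySem.Str.isIn "Change" n then 8
  else 9

theorem pvFirst_eq_chain (n : String) : pvFirstCat n pvKeywordCategory = pvChainCat n := by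
  simp only [pvKeywordCategory, pvFirstCat, pvChainCat]
  by_cases h0 : PySem.Str.isIn "Leadership" n = true
  · simp only [h0, Bool.true_or, Bool.or_true, Bool.false_or, Bool.or_false, Bool.false_eq_true, if_true, if_false, eq_self_iff_true, not_false_eq_true]
  by_cases h1 : PySem.Str.isIn "Strategic" n = true
  · simp only [h0, h1, Bool.true_or, Bool.or_true, Bool.false_or, Bool.or_false, Bool.false_eq_true, if_true, if_false, eq_self_iff_true, not_false_eq_true]
  by_cases h2 : PySem.Str.isIn "Data" n = true
  · simp only [h0, h1, h2, Bool.true_or, Bool.or_true, Bool.false_or, Bool.or_false, Bool.false_eq_true, if_true, if_false, eq_self_iff_true, not_false_eq_true]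
  by_cases h3 : PySem.Str.isIn "Analytics" n = true
  · simp only [h0, h1, h2, h3, Bool.true_or, Bool.or_true, Bool.false_or, Bool.or_false, Bool.false_eq_true, if_true, if_false, eq_self_iff_true, not_false_eq_true]
  by_cases h4 : PySem.Str.isIn "Technology" n = true
  · simp only [h0, h1, h2, h3, h4, Bool.true_or, Bool.or_true, Bool.false_or, Bool.or_false, Bool.false_eq_true, if_true, if_false, eq_self_iff_true, not_false_eq_true]
  by_cases h5 : PySem.Str.isIn "Digital" n = true
  · simp only [h0, h1, h2, h3, h4, h5, Bool.true_or, Bool.or_true, Bool.false_or, Bool.or_false, Bool.false_eq_true, if_true, if_false, eq_self_iff_true, not_false_eq_true]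
  by_cases h6 : PySem.Str.isIn "Tools" n = true
  · simp only [h0, h1, h2, h3, h4, h5, h6, Bool.true_or, Bool.or_true, Bool.false_or, Bool.or_false, Bool.false_eq_true, if_true, if_false, eq_self_iff_true, not_false_eq_true]
  by_cases h7 : PySem.Str.isIn "Monitoring" n = true
  · simp only [h0, h1, h2, h3, h4, h5, h6, h7, Bool.true_or, Bool.or_true, Bool.false_or, Bool.or_false, Bool.false_eq_true, if_true, if_false, eq_self_iff_true, not_false_eq_true]
  by_cases h8 : PySem.Str.isIn "Reporting" n = true
  · simp only [h0, h1, h2, h3, h4, h5, h6, h7, h8, Bool.true_or, Bool.or_true, Bool.false_or, Bool.or_false, Bool.false_eq_true, if_true, if_false, eq_self_iff_true, not_false_eq_true]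
  by_cases h9 : PySem.Str.isIn "Performance" n = true
  · simp only [h0, h1, h2, h3, h4, h5, h6, h7, h8, h9, Bool.true_or, Bool.or_true, Bool.false_or, Bool.or_false, Bool.false_eq_true, if_true, if_false, eq_self_iff_true, not_false_eq_true]
  by_cases h10 : PySem.Str.isIn "Management" n = true
  · simp only [h0, h1, h2, h3, h4, h5, h6, h7, h8, h9, h10, Bool.true_or, Bool.or_true, Bool.false_or, Bool.or_false, Bool.false_eq_true, if_true, if_false, eq_self_iff_true, not_false_eq_true]
  by_cases h11 : PySem.Str.isIn "Coordination" n = true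
  · simp only [h0, h1, h2, h3, h4, h5, h6, h7, h8, h9, h10, h11, Bool.true_or, Bool.or_true, Bool.false_or, Bool.or_false, Bool.false_eq_true, if_true, if_false, eq_self_iff_true, not_false_eq_true]
  by_cases h12 : PySem.Str.isIn "Advisory" n = true
  · simp only [h0, h1, h2, h3, h4, h5, h6, h7, h8, h9, h10, h11, h12, Bool.true_or, Bool.or_true, Bool.false_or, Bool.or_false, Bool.false_eq_true, if_true, if_false, eq_self_iff_true, not_false_eq_true]
  by_cases h13 : PySem.Str.isIn "Consultant" n = true
  · simp only [h0, h1, h2, h3, h4, h5, h6, h7, h8, h9, h10, h11, h12, h13, Bool.true_or, Bool.or_true, Bool.false_or, Bool.or_false, Bool.false_eq_true, if_true, if_false, eq_self_iff_true, not_false_eq_true]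
  by_cases h14 : PySem.Str.isIn "Client" n = true
  · simp only [h0, h1, h2, h3, h4, h5, h6, h7, h8, h9, h10, h11, h12, h13, h14, Bool.true_or, Bool.or_true, Bool.false_or, Bool.or_false, Bool.false_eq_true, if_true, if_false, eq_self_iff_true, not_false_eq_true]
  by_cases h15 : PySem.Str.isIn "Design" n = true
  · simp only [h0, h1, h2, h3, h4, h5, h6, h7, h8, h9, h10, h11, h12, h13, h14, h15, Bool.true_or, Bool.or_true, Bool.false_or, Bool.or_false, Bool.false_eq_true, if_true, if_false, eq_self_iff_true, not_false_eq_true]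
  by_cases h16 : PySem.Str.isIn "Architecture" n = true
  · simp only [h0, h1, h2, h3, h4, h5, h6, h7, h8, h9, h10, h11, h12, h13, h14, h15, h16, Bool.true_or, Bool.or_true, Bool.false_or, Bool.or_false, Bool.false_eq_true, if_true, if_false, eq_self_iff_true, not_false_eq_true]
  by_cases h17 : PySem.Str.isIn "Solution" n = true
  · simp only [h0, h1, h2, h3, h4, h5, h6, h7, h8, h9, h10, h11, h12, h13, h14, h15, h16, h17, Bool.true_or, Bool.or_true, Bool.false_or, Bool.or_false, Bool.false_eq_true, if_true, if_false, eq_self_iff_true, not_false_eq_true]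
  by_cases h18 : PySem.Str.isIn "Training" n = true
  · simp only [h0, h1, h2, h3, h4, h5, h6, h7, h8, h9, h10, h11, h12, h13, h14, h15, h16, h17, h18, Bool.true_or, Bool.or_true, Bool.false_or, Bool.or_false, Bool.false_eq_true, if_true, if_false, eq_self_iff_true, not_false_eq_true]
  by_cases h19 : PySem.Str.isIn "Education" n = true
  · simp only [h0, h1, h2, h3, h4, h5, h6, h7, h8, h9, h10, h11, h12, h13, h14, h15, h16, h17, h18, h19, Bool.true_or, Bool.or_true, Bool.false_or, Bool.or_false, Bool.false_eq_true, if_true, if_false, eq_self_iff_true, not_false_eq_true]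
  by_cases h20 : PySem.Str.isIn "Development" n = true
  · simp only [h0, h1, h2, h3, h4, h5, h6, h7, h8, h9, h10, h11, h12, h13, h14, h15, h16, h17, h18, h19, h20, Bool.true_or, Bool.or_true, Bool.false_or, Bool.or_false, Bool.false_eq_true, if_true, if_false, eq_self_iff_true, not_false_eq_true]
  by_cases h21 : PySem.Str.isIn "Change" n = true
  · simp only [h0, h1, h2, h3, h4, h5, h6, h7, h8, h9, h10, h11, h12, h13, h14, h15, h16, h17, h18, h19, h20, h21, Bool.true_or, Bool.or_true, Bool.false_or, Bool.or_false, Bool.false_eq_true, if_true, if_false, eq_self_iff_true, not_false_eq_true]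
  simp only [h0, h1, h2, h3, h4, h5, h6, h7, h8, h9, h10, h11, h12, h13, h14, h15, h16, h17, h18, h19, h20, h21, Bool.false_or, Bool.or_false, Bool.false_eq_true, if_false, eq_self_iff_true, not_false_eq_true]

set_option maxHeartbeats 2000000 in
theorem pvOutcome_eq (module_name : String) : pvOutcomeA module_name = pvOutcomeB module_name := by
  simp only [pvOutcomeA, pvOutcomeB, pvCategory_eq_first, pvFirst_eq_chain, pvChainCat]
  split_ifs <;> simp [pvTemplates]

theorem generate_module_outcomes_spec : Claim_equal_generate_module_outcomes := by
  intro cd _ _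
  unfold Spec_generate_module_outcomes generate_module_outcomes generate_module_outcomes_alt
  cases (PySem.Dict.mk cd).get? "modules" with
  | none => rfl
  | some mods => simp [pvOutcome_eq]
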